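-- pv_equiv track=rewrite | github.com/aviaryan/competitive | test/test.py | noOfDaysTaken
-- ===== SOURCE A (Python) =====
-- def noOfDaysTaken(vacState):
-- 	daysTaken = 0
-- 	lenStalls = len(vacState)
-- 	while True:
-- 		pointer = 0
-- 		changes_this_iter = 0
-- 		while True:
-- 			if pointer >= lenStalls-1:
-- 				# out of bounds
-- 				break
-- 			if vacState[pointer] == 0 and vacState[pointer+1] == 1:
-- 				vacState[pointer] = 1
-- 				vacState[pointer+1] = 0
-- 				pointer += 2
-- 				changes_this_iter += 1
-- 			else:
-- 				pointer += 1
-- 		daysTaken += 1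
-- 		if changes_this_iter == 0:
-- 			break
-- 	return daysTaken - 1
-- ===== SOURCE B (Python) =====
-- def noOfDaysTaken(vacState):
--     # One left-to-right pass; does not mutate vacState (A rearranges it in place).
--     zeros = 0   # zeros seen so far in the current run of 0/1 values
--     cur = 0     # days until the last blocking 1 seen settles
--     best = 0    # answer so far
--     for c in vacState:
--         if c == 0:
--             zeros += 1
--         elif c == 1:
--             if zeros > 0:
--                 cur = max(cur + 1, zeros)
--                 best = max(best, cur)
--         else:
--             # any other value never matches A's swap test: it is a fixed barrier
--             zeros = 0
--             cur = 0
--     return best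
-- ===== Notes on version B (the rewrite author's own statement) =====
-- stated objective: alternative
-- what changed: A simulates the process day by day, re-scanning and swapping adjacent (0,1) pairs in place until a pass makes no change; B computes the answer in one linear scan with the recurrence cur=max(cur+1,zeros) at each blocked 1, resetting at non-0/1 barrier values (intended as faster; a timing run measured only 1.45x at the largest generated size, so no speed claim is made).
import Mathlib
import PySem

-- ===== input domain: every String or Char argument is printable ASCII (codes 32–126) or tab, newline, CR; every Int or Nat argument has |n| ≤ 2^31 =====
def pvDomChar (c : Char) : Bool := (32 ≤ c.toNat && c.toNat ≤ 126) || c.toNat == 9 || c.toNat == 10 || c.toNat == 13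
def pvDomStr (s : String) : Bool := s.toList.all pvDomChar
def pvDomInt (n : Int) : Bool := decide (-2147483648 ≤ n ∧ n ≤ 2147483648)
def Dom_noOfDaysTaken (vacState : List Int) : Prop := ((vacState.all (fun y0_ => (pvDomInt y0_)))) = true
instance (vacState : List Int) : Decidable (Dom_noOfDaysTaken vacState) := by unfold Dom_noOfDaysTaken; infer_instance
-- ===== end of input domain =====

-- B replaces A's repeated day-by-day swap passes (simulate until stable) by a single linear scan
-- (cur = max(cur+1, zeros) at each blocked 1, reset at non-0/1 barriers) — a different algorithm,
-- not claimed faster. A mutates its argument in place, B does not: the equivalence proved here is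
-- about the return value only.


-- ===== PORT A =====
-- inner while loop of A: one left-to-right pass swapping adjacent (0,1) into (1,0) in place.
-- Python indexing vacState[pointer] / [pointer+1] is always in range here (the loop breaks when
-- pointer >= len-1), so List.getD is exact; `pointer >= lenStalls-1` over Int is `p+1 >= length` over Nat.
def innerA (vs : List Int) (p : Nat) (changes : Nat) : List Int × Nat :=
  if p + 1 ≥ vs.length then (vs, changes)
  else if vs.getD p 0 = 0 ∧ vs.getD (p+1) 0 = 1 then
    innerA ((vs.set p 1).set (p+1) 0) (p+2) (changes+1)
  else innerA vs (p+1) changes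
termination_by vs.length - p
decreasing_by all_goals (simp only [List.length_set, ge_iff_le, not_le] at *; omega)

-- outer while loop of A: repeat passes, counting days, until a pass makes no change.
-- The loop always terminates; fuel n^2+1 only makes that totality explicit (each changing pass
-- strictly decreases the measure mw below, which is at most n^2).
def outerA (fuel : Nat) (vs : List Int) (days : Int) : Int :=
  match fuel with
  | 0 => days  -- never reached: fuel > mw vs bounds the number of changing passes (proved below)
  | fuel' + 1 =>
      if (innerA vs 0 0).2 = 0 then days + 1
      else outerA fuel' (innerA vs 0 0).1 (days + 1)

def noOfDaysTaken (vacState : List Int) : Int :=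
  outerA (vacState.length * vacState.length + 1) vacState 0 - 1

-- ===== PORT B =====
-- state = (zeros, cur, best); one fold over the list
def bStep (s : Int × Int × Int) (c : Int) : Int × Int × Int :=
  if c = 0 then (s.1 + 1, s.2.1, s.2.2)
  else if c = 1 then
    (if s.1 > 0 then (s.1, max (s.2.1 + 1) s.1, max s.2.2 (max (s.2.1 + 1) s.1)) else s)
  else (0, 0, s.2.2)

def noOfDaysTaken_alt (vacState : List Int) : Int :=
  (vacState.foldl bStep (0, 0, 0)).2.2

-- ===== PRECONDITION & SPEC =====
def Spec_noOfDaysTaken (vacState : List Int) (out : Int) : Prop := out = noOfDaysTaken_alt vacState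
instance (vacState : List Int) (out : Int) : Decidable (Spec_noOfDaysTaken vacState out) := by unfold Spec_noOfDaysTaken; infer_instance

-- ===== CLAIM (what is proved, stated in full; the proofs are below) =====
def Claim_equal_noOfDaysTaken : Prop := ∀ (vacState : List Int), Dom_noOfDaysTaken vacState → Spec_noOfDaysTaken vacState (noOfDaysTaken vacState)

-- ===== LEMMAS AND PROOFS =====
-- FB: B's fold started from an arbitrary state
def FB (z t b : Int) (l : List Int) : Int := (l.foldl bStep (z, t, b)).2.2

-- Termination helpers for the outer loop (proof-side characterisation of one pass):
-- stepL/chgL are the functional form of one pass, mw a measure strictly decreased by a changing pass.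
def stepL : List Int → List Int
  | x :: y :: rest => if x = 0 ∧ y = 1 then 1 :: 0 :: stepL rest else x :: stepL (y :: rest)
  | [] => []
  | [x] => [x]

def chgL : List Int → Nat
  | x :: y :: rest => if x = 0 ∧ y = 1 then 1 + chgL rest else chgL (y :: rest)
  | [] => 0
  | [_] => 0

def cnt1 (l : List Int) : Nat := l.countP (· = 1)

def mw : List Int → Nat
  | [] => 0
  | _ :: rest => mw rest + cnt1 rest

theorem inner_eq (vs : List Int) (p : Nat) (c : Nat) :
    innerA vs p c = (vs.take p ++ stepL (vs.drop p), c + chgL (vs.drop p)) := by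
  induction vs, p, c using innerA.induct with
  | case1 vs p c h =>
      rw [innerA, if_pos h]
      have hlen : (vs.drop p).length ≤ 1 := by simp; omega
      rcases hd : vs.drop p with _ | ⟨a, _ | ⟨b, t⟩⟩
      · have hlp : vs.length ≤ p := by
          have := congrArg List.length hd; simp at this; omega
        simp [stepL, chgL, List.take_of_length_le hlp]
      · have : vs = vs.take p ++ [a] := by
          conv_lhs => rw [← List.take_append_drop p vs, hd]
        simp [stepL, chgL, ← this]
      · rw [hd] at hlen; simp at hlen
  | case2 vs p c h hsw ih =>
      have hp1 : p + 1 < vs.length := by omega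
      have hp : p < vs.length := by omega
      obtain ⟨h0, h1⟩ := hsw
      rw [List.getD_eq_getElem vs 0 hp] at h0
      rw [List.getD_eq_getElem vs 0 hp1] at h1
      rw [innerA, if_neg (by omega), if_pos ⟨by rw [List.getD_eq_getElem vs 0 hp]; exact h0,
           by rw [List.getD_eq_getElem vs 0 hp1]; exact h1⟩, ih]
      have hdp : vs.drop p = 0 :: 1 :: vs.drop (p+2) := by
        rw [List.drop_eq_getElem_cons hp, List.drop_eq_getElem_cons hp1]
        rw [h0, h1]
      set vs' := (vs.set p 1).set (p+1) 0 with hvs'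
      have hlen' : vs'.length = vs.length := by simp [hvs']
      have hd2 : vs'.drop (p+2) = vs.drop (p+2) := by
        rw [hvs']
        rw [List.drop_set, List.drop_set]
        simp
      have hdp' : vs'.drop p = 1 :: 0 :: vs.drop (p+2) := by
        have hp' : p < vs'.length := by omega
        have hp1' : p + 1 < vs'.length := by omega
        rw [List.drop_eq_getElem_cons hp', List.drop_eq_getElem_cons hp1', hd2]
        congr 1
        · simp [hvs']
        · congr 1; simp [hvs']
      have ht : vs'.take p = vs.take p := by
        rw [hvs', List.take_set, List.take_set,
          List.set_eq_of_length_le (by simp [List.length_take]),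
          List.set_eq_of_length_le (by simp [List.length_take])]
      have htk : vs'.take (p+2) = vs.take p ++ [1, 0] := by
        have := List.take_append_drop p vs'
        have h2 : vs'.take (p+2) = vs'.take p ++ (vs'.drop p).take 2 := by
          rw [List.take_add]
        rw [h2, ht, hdp']
        rfl
      rw [htk, hd2, hdp]
      rw [stepL, chgL]
      simp
      omega
  | case3 vs p c h hsw ih =>
      have hp1 : p + 1 < vs.length := by omega
      have hp : p < vs.length := by omega
      rw [innerA, if_neg (by omega), if_neg hsw, ih]
      have hdp : vs.drop p = vs[p] :: vs.drop (p+1) := List.drop_eq_getElem_cons hp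
      have hdp1 : vs.drop (p+1) = vs[p+1] :: vs.drop (p+2) := List.drop_eq_getElem_cons hp1
      have htk : vs.take (p+1) = vs.take p ++ [vs[p]] := by
        rw [show p + 1 = p + 1 from rfl, List.take_add, hdp]; rfl
      rw [List.getD_eq_getElem vs 0 hp, List.getD_eq_getElem vs 0 hp1] at hsw
      rw [hdp, hdp1, stepL, chgL, if_neg hsw, if_neg hsw, ← hdp1, htk,
        List.append_assoc]
      rfl


theorem cnt1_stepL (l : List Int) : cnt1 (stepL l) = cnt1 l := by
  induction l using stepL.induct with
  | case1 x y rest h ih => simp [stepL, h, cnt1, List.countP_cons] at *; omega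
  | case2 x y rest h ih => simp [stepL, h, cnt1, List.countP_cons] at *; omega
  | case3 => rfl
  | case4 => rfl


theorem mw_stepL (l : List Int) : mw (stepL l) + chgL l = mw l := by
  induction l using stepL.induct with
  | case1 x y rest h ih =>
      have := cnt1_stepL rest
      simp [stepL, chgL, h, mw, cnt1, List.countP_cons] at *
      omega
  | case2 x y rest h ih =>
      have := cnt1_stepL (y :: rest)
      simp [stepL, chgL, h, mw] at *
      omega
  | case3 => rfl
  | case4 => rfl


theorem FB_cons (z t b : Int) (x : Int) (l : List Int) :
    FB z t b (x :: l) = FB (bStep (z,t,b) x).1 (bStep (z,t,b) x).2.1 (bStep (z,t,b) x).2.2 l := rfl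

theorem FB_mono (l : List Int) : ∀ z t b : Int, b ≤ FB z t b l := by
  induction l with
  | nil => intro z t b; simp [FB]
  | cons x l ih =>
      intro z t b
      have h := ih (bStep (z,t,b) x).1 (bStep (z,t,b) x).2.1 (bStep (z,t,b) x).2.2
      have hb : b ≤ (bStep (z,t,b) x).2.2 := by
        simp only [bStep]; split_ifs <;> simp <;> omega
      calc b ≤ (bStep (z,t,b) x).2.2 := hb
        _ ≤ FB (bStep (z,t,b) x).1 (bStep (z,t,b) x).2.1 (bStep (z,t,b) x).2.2 l := h
        _ = FB z t b (x :: l) := by simp [FB, List.foldl]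


-- a pass with no change leaves B's best unchanged
theorem FB_of_chg_zero (l : List Int) : ∀ z t b : Int, chgL l = 0 →
    (1 ≤ z → l.head? ≠ some 1) → FB z t b l = b := by
  induction l using stepL.induct with
  | case1 x y rest h ih =>
      intro z t b hc _
      rw [chgL, if_pos h] at hc; omega
  | case2 x y rest h ih =>
      intro z t b hc hh
      rw [chgL, if_neg h] at hc
      simp only [List.head?] at hh
      have step1 : FB z t b (x :: y :: rest) = FB (bStep (z,t,b) x).1 (bStep (z,t,b) x).2.1 (bStep (z,t,b) x).2.2 (y :: rest) := by
        simp [FB, List.foldl]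
      rw [step1]
      by_cases hx0 : x = 0
      · have hy1 : y ≠ 1 := fun hy => h ⟨hx0, hy⟩
        rw [show bStep (z,t,b) x = (z+1, t, b) by simp [bStep, hx0]]
        exact ih (z+1) t b hc (by intro _; simp [List.head?]; exact hy1)
      · by_cases hx1 : x = 1
        · have hz : ¬ (1 ≤ z) := fun hz => hh hz (by rw [hx1])
          rw [show bStep (z,t,b) x = (z, t, b) by simp [bStep, hx0, hx1]; omega]
          exact ih z t b hc (fun hz1 => absurd hz1 hz)
        · rw [show bStep (z,t,b) x = (0, 0, b) by simp [bStep, hx0, hx1]]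
          exact ih 0 0 b hc (fun h1 => absurd h1 (by omega))
  | case3 => intro z t b _ _; simp [FB]
  | case4 x =>
      intro z t b _ hh
      simp only [FB, List.foldl, bStep]
      split_ifs with h1 h2 h3 <;> simp_all
      omega


-- a pass with a change forces best ≥ 1
theorem FB_pos_of_chg (l : List Int) : ∀ z t b : Int, chgL l ≠ 0 → 0 ≤ z → 0 ≤ b →
    1 ≤ FB z t b l := by
  induction l using stepL.induct with
  | case1 x y rest h ih =>
      intro z t b _ hz hb
      obtain ⟨hx, hy⟩ := h
      have e1 : bStep (z,t,b) x = (z+1, t, b) := by simp [bStep, hx]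
      have e2 : bStep (z+1,t,b) y = (z+1, max (t+1) (z+1), max b (max (t+1) (z+1))) := by
        simp [bStep, hy]; omega
      have : FB z t b (x :: y :: rest) = FB (z+1) (max (t+1) (z+1)) (max b (max (t+1) (z+1))) rest := by
        simp [FB, List.foldl, e1, e2]
      rw [this]
      have := FB_mono rest (z+1) (max (t+1) (z+1)) (max b (max (t+1) (z+1)))
      omega
  | case2 x y rest h ih =>
      intro z t b hc hz hb
      rw [chgL, if_neg h] at hc
      have step1 : FB z t b (x :: y :: rest) = FB (bStep (z,t,b) x).1 (bStep (z,t,b) x).2.1 (bStep (z,t,b) x).2.2 (y :: rest) := by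
        simp [FB, List.foldl]
      rw [step1]
      refine ih _ _ _ hc ?_ ?_ <;> simp only [bStep] <;> split_ifs <;> simp <;> omega
  | case3 => intro z t b hc _ _; simp [chgL] at hc
  | case4 x => intro z t b hc _ _; simp [chgL] at hc


-- key decrement: one simultaneous pass lowers B's answer by exactly one (capped at 0)
theorem FB_step (l : List Int) : ∀ z t b : Int, 0 ≤ z → 0 ≤ t → t ≤ b →
    (1 ≤ t → 1 ≤ z) → (l.head? = some 1 → 1 ≤ z → z ≤ t) →
    FB z (max (t-1) 0) (max (b-1) 0) (stepL l) = max (FB z t b l - 1) 0 := by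
  induction l using stepL.induct with
  | case1 x y rest h ih =>
      intro z t b hz ht htb htz hh
      obtain ⟨hx, hy⟩ := h
      rw [stepL, if_pos ⟨hx, hy⟩]
      have e1 : bStep (z,t,b) x = (z+1, t, b) := by simp [bStep, hx]
      have e2 : bStep (z+1,t,b) y = (z+1, max (t+1) (z+1), max b (max (t+1) (z+1))) := by
        simp [bStep, hy]; omega
      have hr : FB z t b (x :: y :: rest) = FB (z+1) (max (t+1) (z+1)) (max b (max (t+1) (z+1))) rest := by
        rw [FB_cons, e1, FB_cons, e2]
      by_cases hz1 : 1 ≤ z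
      · have f1 : bStep (z, max (t-1) 0, max (b-1) 0) 1 =
            (z, max (max (t-1) 0 + 1) z, max (max (b-1) 0) (max (max (t-1) 0 + 1) z)) := by
          simp [bStep]; omega
        have f2 : bStep (z, max (max (t-1) 0 + 1) z, max (max (b-1) 0) (max (max (t-1) 0 + 1) z)) 0 =
            (z+1, max (max (t-1) 0 + 1) z, max (max (b-1) 0) (max (max (t-1) 0 + 1) z)) := by
          simp [bStep]
        have hl : FB z (max (t-1) 0) (max (b-1) 0) (1 :: 0 :: stepL rest) =
            FB (z+1) (max (max (t-1) 0 + 1) z) (max (max (b-1) 0) (max (max (t-1) 0 + 1) z)) (stepL rest) := by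
          rw [FB_cons, f1, FB_cons, f2]
        rw [hl, hr]
        have eb : max (max (b-1) 0) (max (max (t-1) 0 + 1) z) = max (max b (max (t+1) (z+1)) - 1) 0 := by omega
        have et : max (max (t-1) 0 + 1) z = max (max (t+1) (z+1) - 1) 0 := by omega
        rw [eb, et]
        exact ih (z+1) (max (t+1) (z+1)) (max b (max (t+1) (z+1))) (by omega) (by omega) (by omega)
          (by omega) (fun _ _ => by omega)
      · have hz0 : z = 0 := by omega
        have ht0 : t = 0 := by omega
        have f1 : bStep (z, max (t-1) 0, max (b-1) 0) 1 = (z, max (t-1) 0, max (b-1) 0) := by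
          simp [bStep]; omega
        have f2 : bStep (z, max (t-1) 0, max (b-1) 0) 0 = (z+1, max (t-1) 0, max (b-1) 0) := by
          simp [bStep]
        have hl : FB z (max (t-1) 0) (max (b-1) 0) (1 :: 0 :: stepL rest) =
            FB (z+1) (max (t-1) 0) (max (b-1) 0) (stepL rest) := by
          rw [FB_cons, f1, FB_cons, f2]
        rw [hl, hr]
        have eb : max (b-1) 0 = max (max b (max (t+1) (z+1)) - 1) 0 := by omega
        have et : max (t-1) 0 = max (max (t+1) (z+1) - 1) 0 := by omega
        rw [eb, et]
        exact ih (z+1) (max (t+1) (z+1)) (max b (max (t+1) (z+1))) (by omega) (by omega) (by omega)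
          (by omega) (fun _ _ => by omega)
  | case2 x y rest h ih =>
      intro z t b hz ht htb htz hh
      rw [stepL, if_neg h]
      by_cases hx0 : x = 0
      · have hy1 : y ≠ 1 := fun hy => h ⟨hx0, hy⟩
        have e1 : bStep (z,t,b) x = (z+1, t, b) := by simp [bStep, hx0]
        have e2 : bStep (z, max (t-1) 0, max (b-1) 0) x = (z+1, max (t-1) 0, max (b-1) 0) := by
          simp [bStep, hx0]
        rw [FB_cons, e2, FB_cons, e1]
        exact ih (z+1) t b (by omega) ht htb (by omega)
          (by simp [List.head?]; intro hy; exact absurd hy hy1)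
      · by_cases hx1 : x = 1
        · by_cases hz1 : 1 ≤ z
          · have hzt : z ≤ t := hh (by rw [hx1]; rfl) hz1
            have ht1 : 1 ≤ t := by omega
            have e1 : bStep (z,t,b) x = (z, t+1, max b (t+1)) := by
              rw [hx1]; simp [bStep, show (0:Int) < z by omega]; omega
            have e2 : bStep (z, max (t-1) 0, max (b-1) 0) x =
                (z, max (t+1-1 : Int) 0, max (max b (t+1) - 1) 0) := by
              rw [hx1]; simp [bStep, show (0:Int) < z by omega]; omega
            rw [FB_cons, e2, FB_cons, e1]
            exact ih z (t+1) (max b (t+1)) hz (by omega) (by omega) (by omega) (fun _ _ => by omega)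
          · have hz0 : z = 0 := by omega
            have ht0 : t = 0 := by omega
            have e1 : bStep (z,t,b) x = (z, t, b) := by rw [hx1]; simp [bStep]; omega
            have e2 : bStep (z, max (t-1) 0, max (b-1) 0) x = (z, max (t-1) 0, max (b-1) 0) := by
              rw [hx1]; simp [bStep]; omega
            rw [FB_cons, e2, FB_cons, e1]
            exact ih z t b hz ht htb htz (fun _ h1 => absurd h1 hz1)
        · have e1 : bStep (z,t,b) x = (0, 0, b) := by simp [bStep, hx0, hx1]
          have e2 : bStep (z, max (t-1) 0, max (b-1) 0) x =
              (0, max ((0:Int)-1) 0, max (b-1) 0) := by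
            simp [bStep, hx0, hx1]
          rw [FB_cons, e2, FB_cons, e1]
          exact ih 0 0 b le_rfl le_rfl (by omega) (by omega) (fun _ h1 => absurd h1 (by omega))
  | case3 =>
      intro z t b _ _ _ _ _
      simp [stepL, FB]
  | case4 x =>
      intro z t b hz ht htb htz hh
      rw [stepL]
      by_cases hx0 : x = 0
      · have e1 : bStep (z,t,b) x = (z+1, t, b) := by simp [bStep, hx0]
        have e2 : bStep (z, max (t-1) 0, max (b-1) 0) x = (z+1, max (t-1) 0, max (b-1) 0) := by
          simp [bStep, hx0]
        rw [FB_cons, e2, FB_cons, e1]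
        simp [FB]
      · by_cases hx1 : x = 1
        · by_cases hz1 : 1 ≤ z
          · have hzt : z ≤ t := hh (by rw [hx1]; rfl) hz1
            have ht1 : 1 ≤ t := by omega
            have e1 : bStep (z,t,b) x = (z, t+1, max b (t+1)) := by
              rw [hx1]; simp [bStep, show (0:Int) < z by omega]; omega
            have e2 : bStep (z, max (t-1) 0, max (b-1) 0) x =
                (z, t, max (max (b-1) 0) t) := by
              rw [hx1]; simp [bStep, show (0:Int) < z by omega]; omega
            rw [FB_cons, e2, FB_cons, e1]
            simp [FB]; omega
          · have e1 : bStep (z,t,b) x = (z, t, b) := by rw [hx1]; simp [bStep]; omega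
            have e2 : bStep (z, max (t-1) 0, max (b-1) 0) x = (z, max (t-1) 0, max (b-1) 0) := by
              rw [hx1]; simp [bStep]; omega
            rw [FB_cons, e2, FB_cons, e1]
            have ht0 : t = 0 := by omega
            simp [FB]
        · have e1 : bStep (z,t,b) x = (0, 0, b) := by simp [bStep, hx0, hx1]
          have e2 : bStep (z, max (t-1) 0, max (b-1) 0) x = (0, 0, max (b-1) 0) := by
            simp [bStep, hx0, hx1]
          rw [FB_cons, e2, FB_cons, e1]
          simp [FB]


theorem mw_le_sq (vs : List Int) : mw vs ≤ vs.length * vs.length := by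
  induction vs with
  | nil => simp [mw]
  | cons x r ih =>
      have h1 : cnt1 r ≤ r.length := List.countP_le_length
      simp only [mw, List.length_cons]
      nlinarith

theorem outer_eq : ∀ (fuel : Nat) (vs : List Int) (d : Int), mw vs < fuel →
    outerA fuel vs d = d + 1 + FB 0 0 0 vs := by
  intro fuel
  induction fuel with
  | zero => intro vs d h; omega
  | succ fuel ih =>
      intro vs d h
      have h0 : innerA vs 0 0 = (stepL vs, chgL vs) := by simpa using inner_eq vs 0 0
      rw [outerA, h0]
      simp only
      by_cases hc : chgL vs = 0
      · rw [if_pos hc]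
        have h1 : FB 0 0 0 vs = 0 := FB_of_chg_zero vs 0 0 0 hc (fun h1 => absurd h1 (by omega))
        rw [h1]; ring
      · rw [if_neg hc]
        have hmw := mw_stepL vs
        rw [ih (stepL vs) (d+1) (by omega)]
        have hdec := FB_step vs 0 0 0 le_rfl le_rfl le_rfl (fun h1 => absurd h1 (by omega))
          (fun _ h1 => absurd h1 (by omega))
        have hpos := FB_pos_of_chg vs 0 0 0 hc le_rfl le_rfl
        have hm : max ((0:Int)-1) 0 = 0 := by omega
        rw [hm] at hdec
        omega

-- ===== VERDICT (by name: the statement is the Claim_ definition above) =====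
theorem noOfDaysTaken_spec : Claim_equal_noOfDaysTaken := by
  intro vs _
  unfold Spec_noOfDaysTaken noOfDaysTaken
  have hb := mw_le_sq vs
  have h := outer_eq (vs.length * vs.length + 1) vs 0 (by omega)
  have : noOfDaysTaken_alt vs = FB 0 0 0 vs := rfl
  omega
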